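-- pv_equiv track=rewrite | github.com/guixiaole/leetcode | divideseven.py | divideseven
-- ===== SOURCE A (Python) =====
-- def divideseven(nums):
--     length_seven = 0
--     for i in range(0, len(nums)):
--         for j in range(i + 1, len(nums)):
--             h = 0
--             sum_all = 0
--             flag = 1
--             while h <= len(nums) - 1:
--                 if h == i:
--                     h += 1
--                 else:
--                     if j + 1 == h and flag == 1:
--                         sum_all = sum_all * 10 + nums[i]
--                         flag = 0
--                     else:
--                         sum_all = sum_all * 10 + nums[h]
--                         h += 1
--             if j == len(nums) - 1:
--                 sum_all = sum_all * 10 + nums[i]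
--             if sum_all % 7 == 0:
--                 length_seven += 1
--     p, sum_all = 0, 0
--     while p <= len(nums) - 1:
--         sum_all = sum_all * 10 + nums[p]
--         p += 1
--     if sum_all % 7 == 0:
--         length_seven += 1
--     return length_seven
-- ===== SOURCE B (Python) =====
-- def divideseven(nums):
--     n = len(nums)
--     total = 0
--     for x in nums:
--         total = (total * 10 + x) % 7
--     count = 1 if total == 0 else 0
--     pow10 = [1]
--     pw = 1
--     for _ in range(n):
--         pw = pw * 10 % 7
--         pow10.append(pw)
--     for i in range(n):
--         x = nums[i]
--         rem = nums[:i] + nums[i+1:]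
--         m = n - 1
--         pref = [0]
--         acc = 0
--         for d in rem:
--             acc = (acc * 10 + d) % 7
--             pref.append(acc)
--         suf_rev = [0]
--         acc = 0
--         for k in range(m - 1, -1, -1):
--             acc = (rem[k] * pow10[m - 1 - k] + acc) % 7
--             suf_rev.append(acc)
--         suf = suf_rev[::-1]
--         for j in range(i + 1, n):
--             if ((pref[j] * 10 + x) % 7 * pow10[m - j] + suf[j]) % 7 == 0:
--                 count += 1
--     return count
-- ===== Notes on version B (the rewrite author's own statement) =====
-- stated objective: faster
-- what changed: Instead of re-walking all n digits (building a huge exact integer) for every pair (i,j), B precomputes powers of 10 mod 7 plus prefix and suffix weighted mod-7 sums of the list with element i removed, and evaluates each move's divisibility in O(1) with all arithmetic reduced mod 7.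
import Mathlib
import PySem

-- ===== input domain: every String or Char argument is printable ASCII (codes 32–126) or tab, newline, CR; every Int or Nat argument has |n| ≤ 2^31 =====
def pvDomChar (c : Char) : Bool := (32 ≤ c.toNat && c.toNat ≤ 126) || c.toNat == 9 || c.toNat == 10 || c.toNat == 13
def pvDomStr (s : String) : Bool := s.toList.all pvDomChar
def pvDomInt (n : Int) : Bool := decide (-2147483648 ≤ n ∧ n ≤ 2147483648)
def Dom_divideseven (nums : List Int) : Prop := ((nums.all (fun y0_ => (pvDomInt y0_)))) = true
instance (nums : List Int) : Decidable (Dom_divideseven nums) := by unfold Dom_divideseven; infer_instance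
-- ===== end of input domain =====

-- B replaces A's per-pair O(n) digit-walk (O(n^3) with huge bignum values) by prefix/suffix
-- mod-7 sums and powers of 10 mod 7, evaluating each move in O(1): O(n^2), measurably faster.

-- ===== PORT A =====
-- A's inner while loop; the fuel argument only makes the same computation total
-- (2*len+2 fuel always suffices, proved below), it never changes a computed value.
def aGo (nums : List Int) (i j : Int) : Nat → Int → Int → Int → Int
  | 0, _, s, _ => s
  | f+1, h, s, flag =>
    if h ≤ (nums.length : Int) - 1 then
      if h = i then aGo nums i j f (h+1) s flag
      else if j + 1 = h ∧ flag = 1 then aGo nums i j f h (s * 10 + PySem.List.pyGetD nums i 0) 0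
      else aGo nums i j f (h+1) (s * 10 + PySem.List.pyGetD nums h 0) flag
    else s

def divideseven (nums : List Int) : Int :=
  let n : Int := (nums.length : Int)
  let c := (PySem.List.pyRange 0 n 1).foldl (fun acc i =>
    (PySem.List.pyRange (i+1) n 1).foldl (fun acc2 j =>
      let s := aGo nums i j (2 * nums.length + 2) 0 0 1
      let s2 := if j = n - 1 then s * 10 + PySem.List.pyGetD nums i 0 else s
      if PySem.Int.mod s2 7 = 0 then acc2 + 1 else acc2) acc) 0
  let sall := (PySem.List.pyRange 0 n 1).foldl (fun s p => s * 10 + PySem.List.pyGetD nums p 0) 0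
  if PySem.Int.mod sall 7 = 0 then c + 1 else c

-- ===== PORT B =====
def divideseven_alt (nums : List Int) : Int :=
  let n : Int := (nums.length : Int)
  let total := nums.foldl (fun t x => PySem.Int.mod (t * 10 + x) 7) 0
  let count0 : Int := if total = 0 then 1 else 0
  let pw := (PySem.List.pyRange 0 n 1).foldl
      (fun st _ => (st.1 ++ [PySem.Int.mod (st.2 * 10) 7], PySem.Int.mod (st.2 * 10) 7))
      ([(1 : Int)], (1 : Int))
  let pow10 := pw.1
  (PySem.List.pyRange 0 n 1).foldl (fun count i =>
    let x := PySem.List.pyGetD nums i 0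
    let rem := PySem.List.slice nums none (some i) ++ PySem.List.slice nums (some (i+1)) none
    let m := n - 1
    let pr := rem.foldl
        (fun st d => (st.1 ++ [PySem.Int.mod (st.2 * 10 + d) 7], PySem.Int.mod (st.2 * 10 + d) 7))
        ([(0 : Int)], (0 : Int))
    let pref := pr.1
    let sr := (PySem.List.pyRange (m - 1) (-1) (-1)).foldl
        (fun st k =>
          let v := PySem.Int.mod (PySem.List.pyGetD rem k 0 * PySem.List.pyGetD pow10 (m - 1 - k) 0 + st.2) 7
          (st.1 ++ [v], v))
        ([(0 : Int)], (0 : Int))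
    let suf := (PySem.List.slice? sr.1 none none (-1)).getD []   -- suf_rev[::-1]
    (PySem.List.pyRange (i+1) n 1).foldl (fun c j =>
      if PySem.Int.mod (PySem.Int.mod (PySem.List.pyGetD pref j 0 * 10 + x) 7 * PySem.List.pyGetD pow10 (m - j) 0 + PySem.List.pyGetD suf j 0) 7 = 0
      then c + 1 else c) count) count0

-- ===== PRECONDITION & SPEC =====
def Spec_divideseven (nums : List Int) (out : Int) : Prop := out = divideseven_alt nums
instance (nums : List Int) (out : Int) : Decidable (Spec_divideseven nums out) := by unfold Spec_divideseven; infer_instance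

-- ===== CLAIM (what is proved, stated in full; the proofs are below) =====
def Claim_equal_divideseven : Prop := ∀ (nums : List Int), Dom_divideseven nums → Spec_divideseven nums (divideseven nums)

-- ===== LEMMAS AND PROOFS =====

-- the value a*10+digit folding computes
def valA (l : List Int) (a : Int) : Int := l.foldl (fun b x => b * 10 + x) a
def valL (l : List Int) : Int := valA l 0
-- the list with element i removed, and the rearranged list for a move (i, j)
def remN (nums : List Int) (i : Nat) : List Int := nums.take i ++ nums.drop (i+1)
def seqN (nums : List Int) (i j : Nat) : List Int :=
  (remN nums i).take j ++ [nums.getD i 0] ++ (remN nums i).drop j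
-- running mod-7 fold
def pm (l : List Int) (a : Int) : Int := l.foldl (fun b d => (b * 10 + d) % 7) a

theorem mod7 (x : Int) : PySem.Int.mod x 7 = x % 7 :=
  PySem.Int.mod_eq_emod_of_pos (by norm_num)

theorem valA_append (l1 l2 : List Int) (a : Int) : valA (l1 ++ l2) a = valA l2 (valA l1 a) := by
  simp [valA, List.foldl_append]

theorem valA_eq (l : List Int) : ∀ a, valA l a = a * 10 ^ l.length + valL l := by
  induction l with
  | nil => intro a; simp [valA, valL]
  | cons x t ih =>
    intro a
    have h1 : valA (x :: t) a = valA t (a * 10 + x) := rfl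
    have h2 : valL (x :: t) = valA t (0 * 10 + x) := rfl
    rw [h1, ih, h2, ih]
    simp [List.length_cons, valL]
    ring

theorem valA_emod_congr (t : List Int) {a b : Int} (h : a % 7 = b % 7) :
    valA t a % 7 = valA t b % 7 := by
  rw [valA_eq, valA_eq, Int.add_emod, Int.mul_emod, h, ← Int.mul_emod, ← Int.add_emod]

theorem pm_eq (l : List Int) : ∀ a, a % 7 = a → pm l a = valA l a % 7 := by
  induction l with
  | nil => intro a h; simpa [pm, valA] using h.symm
  | cons d t ih =>
    intro a h
    have h1 : pm (d :: t) a = pm t ((a * 10 + d) % 7) := rfl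
    have h2 : valA (d :: t) a = valA t (a * 10 + d) := rfl
    rw [h1, h2, ih _ (Int.emod_emod_of_dvd _ dvd_rfl)]
    exact valA_emod_congr t (Int.emod_emod_of_dvd _ dvd_rfl)

-- ---- characterisation of A's while loop ----

-- the digits still to be consumed once the moved element has been re-inserted
theorem aGo_flag0 (nums : List Int) (i j : Int) :
    ∀ (f : Nat) (c : Nat) (s : Int), i < (c : Int) → nums.length ≤ c + f →
      aGo nums i j f (c : Int) s 0 = valA (nums.drop c) s := by
  intro f
  induction f with
  | zero =>
    intro c s hi hf
    have hd : nums.drop c = [] := List.drop_eq_nil_of_le (by omega)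
    simp [aGo, hd, valA]
  | succ f ih =>
    intro c s hi hf
    rw [aGo]
    by_cases hc : (c : Int) ≤ (nums.length : Int) - 1
    · have hcn : c < nums.length := by push_cast at hc; omega
      rw [if_pos hc, if_neg (by omega), if_neg (by simp)]
      have hcast : ((c : Int) + 1) = ((c + 1 : Nat) : Int) := by push_cast; ring
      rw [hcast, ih (c+1) _ (by push_cast; omega) (by omega)]
      have hd : nums.drop c = nums[c] :: nums.drop (c+1) :=
        List.drop_eq_getElem_cons hcn
      rw [hd]
      have hg : PySem.List.pyGetD nums (c : Int) 0 = nums[c] := by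
        simp [PySem.List.pyGetD_natCast, List.getD_eq_getElem?_getD, hcn]
      rw [hg]
      rfl
    · rw [if_neg hc]
      have hlen : nums.length ≤ c := by push_cast at hc; omega
      simp [List.drop_eq_nil_of_le hlen, valA]

-- what remains of the rearranged sequence from position c, once past i (x = moved value)
def midN (nums : List Int) (x : Int) (j c : Nat) : List Int :=
  (nums.drop c).take (j + 1 - c) ++
    (if j + 1 < nums.length then x :: nums.drop (j+1) else [])

theorem aGo_mid (nums : List Int) (i : Int) (j : Nat) (hj : j < nums.length) :
    ∀ (f : Nat) (c : Nat) (s : Int), i < (c : Int) → c ≤ j + 1 →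
      2 * nums.length + 2 ≤ c + f →
      aGo nums i (j : Int) f (c : Int) s 1
        = valA (midN nums (PySem.List.pyGetD nums i 0) j c) s := by
  intro f
  induction f with
  | zero => intro c s hi hcj hf; omega
  | succ f ih =>
    intro c s hi hcj hf
    rw [aGo]
    by_cases hc : (c : Int) ≤ (nums.length : Int) - 1
    · have hcn : c < nums.length := by push_cast at hc; omega
      rw [if_pos hc, if_neg (by omega)]
      by_cases hcj1 : c = j + 1
      · have hcond : (j : Int) + 1 = (c : Int) ∧ (1 : Int) = 1 := by
          constructor
          · omega
          · rfl
        rw [if_pos hcond]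
        rw [aGo_flag0 nums i (j : Int) f c _ hi (by omega)]
        have hmid : midN nums (PySem.List.pyGetD nums i 0) j c
            = PySem.List.pyGetD nums i 0 :: nums.drop (j+1) := by
          unfold midN
          rw [if_pos (by omega)]
          simp [hcj1]
        rw [hmid, ← hcj1]
        rfl
      · have hcj' : c ≤ j := by omega
        rw [if_neg (by push_cast; omega)]
        have hcast : ((c : Int) + 1) = ((c + 1 : Nat) : Int) := by push_cast; ring
        rw [hcast, ih (c+1) _ (by push_cast; omega) (by omega) (by omega)]
        have hd : nums.drop c = nums[c] :: nums.drop (c+1) :=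
          List.drop_eq_getElem_cons hcn
        have hmid : midN nums (PySem.List.pyGetD nums i 0) j c
            = nums[c] :: midN nums (PySem.List.pyGetD nums i 0) j (c+1) := by
          unfold midN
          have h1 : j + 1 - c = (j - c) + 1 := by omega
          have h2 : j + 1 - (c + 1) = j - c := by omega
          rw [h1, h2, hd, List.take_succ_cons, List.cons_append]
        rw [hmid]
        have hg : PySem.List.pyGetD nums (c : Int) 0 = nums[c] := by
          simp [PySem.List.pyGetD_natCast, List.getD_eq_getElem?_getD, hcn]
        rw [hg]
        rfl
    · rw [if_neg hc]
      have hlen : nums.length ≤ c := by push_cast at hc; omega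
      have hcj1 : c = j + 1 := by omega
      have hmid : midN nums (PySem.List.pyGetD nums i 0) j c = [] := by
        unfold midN
        rw [if_neg (by omega)]
        simp [List.drop_eq_nil_of_le hlen]
      rw [hmid]
      rfl

theorem aGo_pre (nums : List Int) (i j : Nat) (hij : i < j) (hj : j < nums.length) :
    ∀ (f : Nat) (c : Nat) (s : Int), c ≤ i → 2 * nums.length + 2 ≤ c + f →
      aGo nums (i : Int) (j : Int) f (c : Int) s 1
        = valA ((nums.drop c).take (i - c)
            ++ midN nums (PySem.List.pyGetD nums (i : Int) 0) j (i+1)) s := by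
  intro f
  induction f with
  | zero => intro c s hci hf; omega
  | succ f ih =>
    intro c s hci hf
    rw [aGo]
    have hin : i < nums.length := by omega
    rw [if_pos (by omega)]
    by_cases hc : c = i
    · rw [if_pos (by omega)]
      have hcast : ((c : Int) + 1) = ((c + 1 : Nat) : Int) := by push_cast; ring
      rw [hcast, aGo_mid nums (i : Int) j hj f (c+1) s (by push_cast; omega)
        (by omega) (by omega)]
      rw [hc]
      simp
    · have hci' : c < i := by omega
      rw [if_neg (by omega), if_neg (by omega)]
      have hcast : ((c : Int) + 1) = ((c + 1 : Nat) : Int) := by push_cast; ring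
      rw [hcast, ih (c+1) _ (by omega) (by omega)]
      have hcn : c < nums.length := by omega
      have hd : nums.drop c = nums[c] :: nums.drop (c+1) :=
        List.drop_eq_getElem_cons hcn
      have hg : PySem.List.pyGetD nums (c : Int) 0 = nums[c] := by
        simp [PySem.List.pyGetD_natCast, List.getD_eq_getElem?_getD, hcn]
      rw [hg, hd]
      have : i - c = (i - (c+1)) + 1 := by omega
      rw [this]
      rfl

theorem seq_decomp (nums : List Int) (i j : Nat) (hij : i < j) (hj : j < nums.length) :
    seqN nums i j
      = nums.take i ++ ((nums.drop (i+1)).take (j-i) ++ (nums.getD i 0 :: nums.drop (j+1))) := by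
  unfold seqN remN
  have hti : (nums.take i).length = i := by
    rw [List.length_take]; omega
  rw [List.take_append, List.drop_append, hti]
  have h1 : (nums.take i).take j = nums.take i := by
    apply List.take_of_length_le; omega
  have h2 : (nums.take i).drop j = [] := by
    apply List.drop_eq_nil_of_le; omega
  have h3 : (nums.drop (i+1)).drop (j - i) = nums.drop (j+1) := by
    rw [List.drop_drop]
    congr 1
    omega
  rw [h1, h2, h3]
  simp

theorem A_pair (nums : List Int) (i j : Nat) (hij : i < j) (hj : j < nums.length) :
    (if (j : Int) = (nums.length : Int) - 1
      then aGo nums (i:Int) (j:Int) (2*nums.length+2) (0:Int) 0 1 * 10 + PySem.List.pyGetD nums (i:Int) 0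
      else aGo nums (i:Int) (j:Int) (2*nums.length+2) (0:Int) 0 1)
    = valL (seqN nums i j) := by
  have h0 : aGo nums (i:Int) (j:Int) (2*nums.length+2) ((0:Nat):Int) 0 1
      = valA ((nums.drop 0).take (i-0)
          ++ midN nums (PySem.List.pyGetD nums (i:Int) 0) j (i+1)) 0 :=
    aGo_pre nums i j hij hj (2*nums.length+2) 0 0 (by omega) (by omega)
  rw [show ((0:Nat):Int) = (0:Int) by norm_num] at h0
  have hx : PySem.List.pyGetD nums (i:Int) 0 = nums.getD i 0 := by
    simp [PySem.List.pyGetD_natCast]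
  have hji : j + 1 - (i + 1) = j - i := by omega
  rw [seq_decomp nums i j hij hj]
  by_cases hlast : j + 1 = nums.length
  · rw [if_pos (by omega)]
    have hmid : midN nums (PySem.List.pyGetD nums (i:Int) 0) j (i+1)
        = (nums.drop (i+1)).take (j-i) := by
      unfold midN
      rw [if_neg (by omega), hji]
      simp
    rw [h0, hmid]
    have hdj : nums.drop (j+1) = [] := by
      apply List.drop_eq_nil_of_le; omega
    rw [hdj, hx]
    have : valA (nums.drop 0) 0 = valA nums 0 := by rw [List.drop_zero]
    simp only [List.drop_zero, Nat.sub_zero]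
    rw [show (nums.take i ++ ((nums.drop (i+1)).take (j-i) ++ [nums.getD i 0] : List Int))
        = (nums.take i ++ (nums.drop (i+1)).take (j-i)) ++ [nums.getD i 0] by
      simp [List.append_assoc]]
    simp [valL, valA]
  · rw [if_neg (by omega)]
    have hmid : midN nums (PySem.List.pyGetD nums (i:Int) 0) j (i+1)
        = (nums.drop (i+1)).take (j-i) ++ (nums.getD i 0 :: nums.drop (j+1)) := by
      unfold midN
      rw [if_pos (by omega), hji, hx]
    rw [h0, hmid]
    simp only [List.drop_zero, Nat.sub_zero]
    rfl

-- ---- characterisation of B's list builders ----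

theorem build_gen {α : Type} (f : Int → α → Int) :
    ∀ (l : List α) (p : List Int) (a : Int),
      l.foldl (fun st d => (st.1 ++ [f st.2 d], f st.2 d)) (p, a)
        = (p ++ (List.range l.length).map (fun t => (l.take (t+1)).foldl f a),
           l.foldl f a) := by
  intro l
  induction l with
  | nil => intro p a; simp
  | cons d t ih =>
    intro p a
    simp only [List.foldl_cons]
    rw [ih (p ++ [f a d]) (f a d)]
    simp [List.range_succ_eq_map, List.map_map, Function.comp_def, List.take_succ_cons,
      List.append_assoc]

theorem foldl_pow {α : Type} : ∀ (l : List α) (q : Nat),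
    l.foldl (fun b _ => (b * 10) % 7) ((10:Int)^q % 7) = (10:Int)^(q + l.length) % 7 := by
  intro l
  induction l with
  | nil => intro q; simp
  | cons x t ih =>
    intro q
    rw [List.foldl_cons]
    have key : ((10:Int)^q % 7 * 10) % 7 = (10:Int)^(q+1) % 7 := by
      rw [Int.mul_emod, Int.emod_emod_of_dvd _ dvd_rfl, ← Int.mul_emod, ← pow_succ]
    rw [key, ih (q+1)]
    congr 1
    simp [List.length_cons]
    ring

theorem mod_mix (a p c : Int) : (a * (p % 7) + c % 7) % 7 = (a * p + c) % 7 := by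
  conv_lhs => rw [Int.add_emod, Int.mul_emod]
  conv_rhs => rw [Int.add_emod, Int.mul_emod]
  rw [Int.emod_emod_of_dvd _ dvd_rfl, Int.emod_emod_of_dvd _ dvd_rfl]

theorem getD_map_range' (g : Nat → Int) (N k : Nat) (hk : k < N) :
    ((List.range N).map g).getD k 0 = g k := by
  rw [List.getD_eq_getElem _ _ (by simpa using hk)]
  simp

theorem pow10_spec (nums : List Int) :
    ((PySem.List.pyRange 0 (nums.length:Int) 1).foldl
      (fun st (_ : Int) => (st.1 ++ [(st.2 * 10) % 7], (st.2 * 10) % 7)) ([(1:Int)], (1:Int))).1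
    = (List.range (nums.length+1)).map (fun k => (10:Int)^k % 7) := by
  rw [build_gen (fun b (_ : Int) => (b * 10) % 7)]
  have hlen : (PySem.List.pyRange 0 (nums.length:Int) 1).length = nums.length := by
    simp [PySem.List.length_pyRange_one]
  rw [hlen, List.range_succ_eq_map]
  have hone : ∀ (l : List Int), l.foldl (fun b (_ : Int) => (b * 10) % 7) 1
      = (10:Int)^(l.length) % 7 := by
    intro l
    have h := foldl_pow l 0
    norm_num at h
    exact h
  have hmap : ∀ t ∈ List.range nums.length,
      ((PySem.List.pyRange 0 (nums.length:Int) 1).take (t+1)).foldl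
        (fun b (_ : Int) => (b * 10) % 7) 1 = (10:Int)^(t+1) % 7 := by
    intro t ht
    rw [List.mem_range] at ht
    rw [hone, List.length_take, hlen]
    have hmin : min (t+1) nums.length = t+1 := by omega
    rw [hmin]
  rw [List.map_congr_left hmap]
  simp [List.map_map, Function.comp_def]

theorem pref_spec (rem : List Int) :
    (rem.foldl (fun st d => (st.1 ++ [(st.2 * 10 + d) % 7], (st.2 * 10 + d) % 7))
        ([(0:Int)], (0:Int))).1
    = (List.range (rem.length+1)).map (fun t => valL (rem.take t) % 7) := by
  rw [build_gen (fun b d => (b * 10 + d) % 7), List.range_succ_eq_map]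
  have hmap : ∀ t ∈ List.range rem.length,
      (rem.take (t+1)).foldl (fun b d => (b * 10 + d) % 7) 0 = valL (rem.take (t+1)) % 7 := by
    intro t _
    have := pm_eq (rem.take (t+1)) 0 (by decide)
    simpa [pm, valL] using this
  rw [List.map_congr_left hmap]
  simp [List.map_map, Function.comp_def, valL, valA]

theorem suf_entry (nn : Nat) (rem : List Int) (hr : rem.length + 1 = nn) :
    ∀ t, t ≤ rem.length →
      ((PySem.List.pyRange ((nn:Int) - 1 - 1) (-1) (-1)).take t).foldl
        (fun b k => (PySem.List.pyGetD rem k 0 *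
            PySem.List.pyGetD ((List.range (nn+1)).map (fun u => (10:Int)^u % 7))
              ((nn:Int) - 1 - 1 - k) 0 + b) % 7) 0
      = valL (rem.drop (rem.length - t)) % 7 := by
  have hcast : (nn:Int) - 1 - 1 = ((rem.length:Int)) - 1 := by
    have := hr
    push_cast [← this]
    ring
  have hkl : PySem.List.pyRange ((nn:Int) - 1 - 1) (-1) (-1)
      = (List.range rem.length).map (fun k : Nat => ((rem.length:Int)) - 1 - (k:Int)) := by
    rw [hcast, PySem.List.pyRange_neg_one]
    have h5 : (((rem.length:Int)) - 1 - (-1)).toNat = rem.length := by omega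
    rw [h5]
  intro t
  induction t with
  | zero =>
    intro _
    simp [valL, valA, List.drop_length]
  | succ t ih =>
    intro ht
    have htm : t < rem.length := by omega
    have hlenk : (PySem.List.pyRange ((nn:Int) - 1 - 1) (-1) (-1)).length = rem.length := by
      rw [hkl]; simp
    have hget : (PySem.List.pyRange ((nn:Int) - 1 - 1) (-1) (-1))[t]? 
        = some (((rem.length:Int)) - 1 - t) := by
      rw [hkl]
      rw [List.getElem?_eq_getElem (by simpa using htm)]
      simp
    rw [List.take_add_one, hget, List.foldl_append, ih (by omega)]
    simp only [Option.toList_some, List.foldl_cons, List.foldl_nil]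
    -- evaluate the step
    have hq : ((rem.length:Int)) - 1 - t = ((rem.length - 1 - t : Nat) : Int) := by
      omega
    have hg1 : PySem.List.pyGetD rem (((rem.length:Int)) - 1 - t) 0
        = rem[rem.length - 1 - t]'(by omega) := by
      rw [hq, PySem.List.pyGetD_natCast]
      rw [List.getD_eq_getElem _ _ (by omega)]
    have hidx : (nn:Int) - 1 - 1 - (((rem.length:Int)) - 1 - t) = ((t:Nat):Int) := by
      rw [hcast]; ring
    have hg2 : PySem.List.pyGetD ((List.range (nn+1)).map (fun u => (10:Int)^u % 7))
        ((nn:Int) - 1 - 1 - (((rem.length:Int)) - 1 - t)) 0 = (10:Int)^t % 7 := by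
      rw [hidx]
      simp only [PySem.List.pyGetD_natCast]
      exact getD_map_range' _ _ _ (by omega)
    rw [hg1, hg2, mod_mix]
    -- arithmetic identity on the real values
    have hdrop : rem.drop (rem.length - 1 - t)
        = rem[rem.length - 1 - t]'(by omega) :: rem.drop (rem.length - t) := by
      have h1 : rem.length - 1 - t + 1 = rem.length - t := by omega
      rw [List.drop_eq_getElem_cons (by omega), h1]
    have hval : valL (rem.drop (rem.length - (t+1)))
        = rem[rem.length - 1 - t]'(by omega) * 10^t + valL (rem.drop (rem.length - t)) := by
      have h2 : rem.length - (t+1) = rem.length - 1 - t := by omega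
      rw [h2, hdrop]
      have h3 : valL (rem[rem.length - 1 - t]'(by omega) :: rem.drop (rem.length - t))
          = valA (rem.drop (rem.length - t)) (rem[rem.length - 1 - t]'(by omega)) := by
        simp [valL, valA]
      rw [h3, valA_eq]
      have h4 : (rem.drop (rem.length - t)).length = t := by
        rw [List.length_drop]; omega
      rw [h4]
    rw [hval]

theorem sufRev_spec (nn : Nat) (rem : List Int) (hr : rem.length + 1 = nn) :
    ((PySem.List.pyRange ((nn:Int) - 1 - 1) (-1) (-1)).foldl
      (fun st k =>
        (st.1 ++ [(PySem.List.pyGetD rem k 0 *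
            PySem.List.pyGetD ((List.range (nn+1)).map (fun u => (10:Int)^u % 7))
              ((nn:Int) - 1 - 1 - k) 0 + st.2) % 7],
         (PySem.List.pyGetD rem k 0 *
            PySem.List.pyGetD ((List.range (nn+1)).map (fun u => (10:Int)^u % 7))
              ((nn:Int) - 1 - 1 - k) 0 + st.2) % 7))
      ([(0:Int)], (0:Int))).1
    = (List.range (rem.length+1)).map (fun u => valL (rem.drop (rem.length - u)) % 7) := by
  rw [build_gen (fun b k => (PySem.List.pyGetD rem k 0 *
        PySem.List.pyGetD ((List.range (nn+1)).map (fun u => (10:Int)^u % 7))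
          ((nn:Int) - 1 - 1 - k) 0 + b) % 7)]
  have hlenk : (PySem.List.pyRange ((nn:Int) - 1 - 1) (-1) (-1)).length = rem.length := by
    rw [PySem.List.length_pyRange_neg_one]
    omega
  rw [hlenk]
  have hmap : ∀ t ∈ List.range rem.length,
      ((PySem.List.pyRange ((nn:Int) - 1 - 1) (-1) (-1)).take (t+1)).foldl
        (fun b k => (PySem.List.pyGetD rem k 0 *
            PySem.List.pyGetD ((List.range (nn+1)).map (fun u => (10:Int)^u % 7))
              ((nn:Int) - 1 - 1 - k) 0 + b) % 7) 0
      = valL (rem.drop (rem.length - (t+1))) % 7 := by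
    intro t ht
    rw [List.mem_range] at ht
    exact suf_entry nn rem hr (t+1) (by omega)
  rw [List.map_congr_left hmap]
  conv_rhs => rw [List.range_succ_eq_map]
  simp [List.map_map, Function.comp_def, valL, valA, List.drop_length]

theorem suf_getD (rem : List Int) (t : Nat) (ht : t ≤ rem.length) :
    (((List.range (rem.length+1)).map
        (fun u => valL (rem.drop (rem.length - u)) % 7)).reverse).getD t 0
    = valL (rem.drop t) % 7 := by
  rw [List.getD_eq_getElem _ _ (by simp; omega)]
  rw [List.getElem_reverse]
  simp only [List.getElem_map, List.getElem_range]
  congr 2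
  simp
  omega

-- ---- counting layer ----

theorem foldl_ite_shift {α : Type} (P : α → Prop) [DecidablePred P] :
    ∀ (l : List α) (init : Int),
      l.foldl (fun c x => if P x then c + 1 else c) init
        = init + l.foldl (fun c x => if P x then c + 1 else c) 0 := by
  intro l
  induction l with
  | nil => intro init; simp
  | cons x t ih =>
    intro init
    simp only [List.foldl_cons]
    rw [ih, ih (if P x then 0 + 1 else 0)]
    split_ifs <;> ring

theorem foldl_add_shift {α : Type} (g : α → Int) :
    ∀ (l : List α) (init : Int),
      l.foldl (fun c x => c + g x) init = init + l.foldl (fun c x => c + g x) 0 := by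
  intro l
  induction l with
  | nil => intro init; simp
  | cons x t ih =>
    intro init
    simp only [List.foldl_cons]
    rw [ih, ih (0 + g x)]
    ring

theorem foldl_congr_mem'' {α β : Type} (l : List α) (f g : β → α → β) (init : β)
    (h : ∀ x ∈ l, ∀ acc, f acc x = g acc x) : l.foldl f init = l.foldl g init := by
  induction l generalizing init with
  | nil => rfl
  | cons a t ih =>
    simp only [List.foldl_cons]
    rw [h a (by simp)]
    exact ih (g init a) (fun x hx acc => h x (List.mem_cons_of_mem a hx) acc)

def innerSum (nums : List Int) (i : Int) : Int :=
  (PySem.List.pyRange (i+1) (nums.length:Int) 1).foldl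
    (fun c j => if valL (seqN nums i.toNat j.toNat) % 7 = 0 then c + 1 else c) 0

def pairSum (nums : List Int) : Int :=
  (PySem.List.pyRange 0 (nums.length:Int) 1).foldl (fun acc i => acc + innerSum nums i) 0

theorem A_eq (nums : List Int) :
    divideseven nums = pairSum nums + (if valL nums % 7 = 0 then 1 else 0) := by
  unfold divideseven
  simp only [mod7]
  have hall : (PySem.List.pyRange 0 (nums.length:Int) 1).foldl
      (fun s p => s * 10 + PySem.List.pyGetD nums p 0) 0 = valL nums := by
    rw [PySem.List.foldl_pyRange_zero_pyGetD' nums 0 (fun s x => s * 10 + x) 0]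
    rfl
  rw [hall]
  have houter : ∀ i ∈ PySem.List.pyRange 0 (nums.length:Int) 1, ∀ acc : Int,
      (PySem.List.pyRange (i+1) (nums.length:Int) 1).foldl
        (fun acc2 j =>
          if (if j = (nums.length:Int) - 1
              then aGo nums i j (2 * nums.length + 2) 0 0 1 * 10 + PySem.List.pyGetD nums i 0
              else aGo nums i j (2 * nums.length + 2) 0 0 1) % 7 = 0
          then acc2 + 1 else acc2) acc
      = acc + innerSum nums i := by
    intro i hi acc
    rw [PySem.List.mem_pyRange_one] at hi
    have hinner : ∀ j ∈ PySem.List.pyRange (i+1) (nums.length:Int) 1, ∀ acc2 : Int,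
        (if (if j = (nums.length:Int) - 1
            then aGo nums i j (2 * nums.length + 2) 0 0 1 * 10 + PySem.List.pyGetD nums i 0
            else aGo nums i j (2 * nums.length + 2) 0 0 1) % 7 = 0
        then acc2 + 1 else acc2)
        = (if valL (seqN nums i.toNat j.toNat) % 7 = 0 then acc2 + 1 else acc2) := by
      intro j hj acc2
      rw [PySem.List.mem_pyRange_one] at hj
      have hi' : i = ((i.toNat : Nat) : Int) := by omega
      have hj' : j = ((j.toNat : Nat) : Int) := by omega
      have hij : i.toNat < j.toNat := by omega
      have hjn : j.toNat < nums.length := by omega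
      have := A_pair nums i.toNat j.toNat hij hjn
      rw [← hi', ← hj'] at this
      rw [this]
    have step1 := foldl_congr_mem'' _ _
      (fun (c j : Int) => if valL (seqN nums i.toNat j.toNat) % 7 = 0 then c + 1 else c) acc hinner
    rw [step1]
    exact foldl_ite_shift (fun (j : Int) => valL (seqN nums i.toNat j.toNat) % 7 = 0) _ acc
  have step2 := foldl_congr_mem'' _ _ (fun (acc i : Int) => acc + innerSum nums i) (0:Int) houter
  rw [step2]
  rw [show (PySem.List.pyRange 0 (nums.length:Int) 1).foldl
      (fun acc i => acc + innerSum nums i) 0 = pairSum nums from rfl]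
  split_ifs <;> ring

theorem mod_mix2 (a x : Int) : (a % 7 * 10 + x) % 7 = (a * 10 + x) % 7 := by
  conv_lhs => rw [Int.add_emod, Int.mul_emod, Int.emod_emod_of_dvd _ dvd_rfl]
  conv_rhs => rw [Int.add_emod, Int.mul_emod]

theorem mod_mix3 (b p : Int) : b % 7 * (p % 7) % 7 = b * p % 7 := by
  conv_lhs => rw [Int.mul_emod, Int.emod_emod_of_dvd _ dvd_rfl, Int.emod_emod_of_dvd _ dvd_rfl]
  conv_rhs => rw [Int.mul_emod]

theorem mod_mix4 (b p c : Int) : (b % 7 * (p % 7) + c % 7) % 7 = (b * p + c) % 7 := by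
  conv_lhs => rw [Int.add_emod, mod_mix3 b p, Int.emod_emod_of_dvd _ dvd_rfl]
  conv_rhs => rw [Int.add_emod]

theorem length_remN (nums : List Int) (i' : Nat) (h : i' < nums.length) :
    (remN nums i').length = nums.length - 1 := by
  unfold remN
  rw [List.length_append, List.length_take, List.length_drop]
  omega

theorem B_pair (nums : List Int) (i' j' : Nat) (hij : i' < j') (hj : j' < nums.length) :
    ((valL ((remN nums i').take j') % 7 * 10 + nums.getD i' 0) % 7
        * ((10:Int)^((nums.length - 1) - j') % 7)
      + valL ((remN nums i').drop j') % 7) % 7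
    = valL (seqN nums i' j') % 7 := by
  have hL : ((remN nums i').drop j').length = (nums.length - 1) - j' := by
    rw [List.length_drop, length_remN nums i' (by omega)]
  have h1 : valL (seqN nums i' j')
      = (valL ((remN nums i').take j') * 10 + nums.getD i' 0)
          * 10 ^ (((remN nums i').drop j').length)
        + valL ((remN nums i').drop j') := by
    unfold seqN
    rw [valL, valA_append, valA_append]
    rw [show valA [nums.getD i' 0] (valA ((remN nums i').take j') 0)
        = valA ((remN nums i').take j') 0 * 10 + nums.getD i' 0 from rfl]
    rw [valA_eq]
    rfl
  rw [mod_mix2, mod_mix4, ← hL, ← h1]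

theorem B_eq (nums : List Int) :
    divideseven_alt nums = (if valL nums % 7 = 0 then 1 else 0) + pairSum nums := by
  unfold divideseven_alt
  simp only [mod7]
  have htot : nums.foldl (fun t x => (t * 10 + x) % 7) 0 = valL nums % 7 := by
    have h := pm_eq nums 0 (by decide)
    simpa [pm, valL] using h
  rw [htot, pow10_spec]
  refine Eq.trans (foldl_congr_mem'' _ _ (fun (acc i : Int) => acc + innerSum nums i) _ ?_) ?_
  · intro i hi acc
    rw [PySem.List.mem_pyRange_one] at hi
    obtain ⟨k, rfl⟩ : ∃ k : Nat, i = (k : Int) := ⟨i.toNat, by omega⟩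
    have hk : k < nums.length := by exact_mod_cast hi.2
    have hrem : PySem.List.slice nums none (some (k:Int))
        ++ PySem.List.slice nums (some ((k:Int)+1)) none = remN nums k := by
      rw [PySem.List.slice_to _ (by omega), PySem.List.slice_from _ (by omega)]
      unfold remN
      have h1 : ((k:Int)).toNat = k := Int.toNat_natCast k
      have h2 : ((k:Int)+1).toNat = k+1 := by omega
      rw [h1, h2]
    rw [hrem, pref_spec (remN nums k)]
    have hlenrem : (remN nums k).length + 1 = nums.length := by
      rw [length_remN nums k hk]; omega
    rw [sufRev_spec nums.length (remN nums k) hlenrem]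
    rw [PySem.List.slice?_none_none_neg_one]
    simp only [Option.getD_some]
    refine Eq.trans (foldl_congr_mem'' _ _
      (fun (c j : Int) => if valL (seqN nums ((k:Int)).toNat j.toNat) % 7 = 0 then c + 1 else c)
      acc ?_) ?_
    · intro j hj c
      rw [PySem.List.mem_pyRange_one] at hj
      obtain ⟨t, rfl⟩ : ∃ t : Nat, j = (t : Int) := ⟨j.toNat, by omega⟩
      have hkt : k < t := by exact_mod_cast (by omega : (k:Int) < t)
      have htn : t < nums.length := by exact_mod_cast hj.2
      have htm : t ≤ (remN nums k).length := by rw [length_remN nums k hk]; omega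
      have hg1 : PySem.List.pyGetD ((List.range ((remN nums k).length + 1)).map
          (fun u => valL ((remN nums k).take u) % 7)) (t:Int) 0
          = valL ((remN nums k).take t) % 7 := by
        rw [PySem.List.pyGetD_natCast]
        exact getD_map_range' _ _ _ (by omega)
      have hg2 : PySem.List.pyGetD ((List.range (nums.length + 1)).map
          (fun u => (10:Int)^u % 7)) ((nums.length:Int) - 1 - (t:Int)) 0
          = (10:Int)^((nums.length - 1) - t) % 7 := by
        have hcast : (nums.length:Int) - 1 - (t:Int) = (((nums.length - 1 - t : Nat)) : Int) := by
          omega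
        rw [hcast, PySem.List.pyGetD_natCast]
        exact getD_map_range' _ _ _ (by omega)
      have hg3 : PySem.List.pyGetD (((List.range ((remN nums k).length + 1)).map
          (fun u => valL ((remN nums k).drop ((remN nums k).length - u)) % 7)).reverse) (t:Int) 0
          = valL ((remN nums k).drop t) % 7 := by
        rw [PySem.List.pyGetD_natCast]
        exact suf_getD (remN nums k) t htm
      have hx : PySem.List.pyGetD nums ((k:Int)) 0 = nums.getD k 0 := by
        simp [PySem.List.pyGetD_natCast]
      simp only [hg1, hg2, hg3, hx]
      simp only [B_pair nums k t hkt htn]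
      simp only [Int.toNat_natCast]
      rfl
    · simp only [Int.toNat_natCast]
      exact foldl_ite_shift (fun (j : Int) => valL (seqN nums k j.toNat) % 7 = 0) _ acc
  · rw [foldl_add_shift (innerSum nums)]
    rfl

-- ===== VERDICT (by name: the statement is the Claim_ definition above) =====
theorem divideseven_spec : Claim_equal_divideseven := by
  intro nums _
  unfold Spec_divideseven
  rw [A_eq, B_eq]
  ring
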